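-- pv_equiv track=rewrite | github.com/shubham11941140/Leetcode-Solutions | 2141-maximum-running-time-of-n-computers/2141-maximum-running-time-of-n-computers.py | maxRunTime
-- ===== SOURCE A (Python) =====
-- from typing import List
--
-- def maxRunTime(n: int, batteries: List[int]) -> int:
--     def cannot_run(n,batteries,time):
--         curr_sum =0
--         for t in batteries:
--             if t <time:
--                 curr_sum +=t
--             else:
--                 curr_sum +=time
--         return curr_sum <n *time
--
--     low,high =0,sum(batteries)// n
--     while low <high:
--         guess =high -(high -low)// 2 # prevent infinite loop to find the maximal T
--         if cannot_run(n,batteries,guess):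
--             high =guess -1
--         else:
--             low =guess
--     return low
-- ===== SOURCE B (Python) =====
-- from typing import List
--
-- def maxRunTime(n: int, batteries: List[int]) -> int:
--     if len(batteries) < n:
--         return 0
--     bs = sorted(batteries)
--     k = len(bs) - n
--     extra = sum(bs[:k])
--     live = bs[k:]
--     count = 1
--     prev = live[0]
--     for nxt in live[1:]:
--         need = count * (nxt - prev)
--         if extra < need:
--             return prev + extra // count
--         extra -= need
--         prev = nxt
--         count += 1
--     return prev + extra // count
-- ===== Notes on version B (the rewrite author's own statement) =====
-- stated objective: alternative
-- what changed: A binary-searches the answer in [0, sum//n], re-scanning all batteries at each probe; B sorts the batteries once and greedily equalizes the n largest bottom-up in a single pass, spending the smaller batteries' energy as a pool.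
-- outside the precondition, e.g. on maxRunTime(2, [-3, 5]): A returns 0, B returns -3; on maxRunTime(-1, [5]): A returns 0, B raises IndexError
import Mathlib
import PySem

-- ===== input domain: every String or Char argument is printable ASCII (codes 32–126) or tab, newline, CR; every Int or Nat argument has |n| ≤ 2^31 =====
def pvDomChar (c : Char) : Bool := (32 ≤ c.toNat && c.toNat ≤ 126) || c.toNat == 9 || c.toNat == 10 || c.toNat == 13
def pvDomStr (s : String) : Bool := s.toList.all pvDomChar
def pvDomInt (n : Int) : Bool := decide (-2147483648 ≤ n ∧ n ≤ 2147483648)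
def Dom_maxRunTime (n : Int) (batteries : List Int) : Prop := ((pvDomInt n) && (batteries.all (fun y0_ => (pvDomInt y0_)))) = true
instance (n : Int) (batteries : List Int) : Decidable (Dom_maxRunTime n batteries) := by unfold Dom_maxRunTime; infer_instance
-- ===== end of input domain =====

-- B replaces A's binary search over the answer by a sort followed by one greedy pass over
-- the batteries (equalize the n largest bottom-up, spending the rest as an energy pool).

-- ===== PORT A =====
-- cannot_run(n, batteries, time)
def pvCannotRun (n : Int) (batteries : List Int) (time : Int) : Bool :=
  let currSum := batteries.foldl (fun s t => if t < time then s + t else s + time) 0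
  decide (currSum < n * time)

-- the 'while low < high' loop of A
def pvLoopA (n : Int) (batteries : List Int) (low high : Int) : Int :=
  if _h : low < high then
    let guess := high - PySem.Int.floordiv (high - low) 2
    if pvCannotRun n batteries guess then pvLoopA n batteries low (guess - 1)
    else pvLoopA n batteries guess high
  else low
termination_by (high - low).toNat
decreasing_by
  · have h2 : PySem.Int.floordiv (high - low) 2 = (high - low) / 2 :=
      PySem.Int.floordiv_eq_ediv_of_pos (by omega)
    omega
  · have h2 : PySem.Int.floordiv (high - low) 2 = (high - low) / 2 :=
      PySem.Int.floordiv_eq_ediv_of_pos (by omega)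
    omega

def maxRunTime (n : Int) (batteries : List Int) : Int :=
  pvLoopA n batteries 0 (PySem.Int.floordiv batteries.sum n)

-- ===== PORT B =====
-- the 'for nxt in live[1:]' loop of B, carrying (extra, count, prev)
def pvLoopB (extra count prev : Int) : List Int → Int
  | [] => prev + PySem.Int.floordiv extra count
  | nxt :: rest =>
    let need := count * (nxt - prev)
    if extra < need then prev + PySem.Int.floordiv extra count
    else pvLoopB (extra - need) (count + 1) nxt rest

def maxRunTime_alt (n : Int) (batteries : List Int) : Int :=
  if (batteries.length : Int) < n then 0
  else
    let bs := PySem.List.sorted batteries (fun x => x) false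
    let k := (batteries.length : Int) - n
    let extra := (PySem.List.slice bs none (some k)).sum
    let live := PySem.List.slice bs (some k) none
    -- live[0]; exact whenever live is nonempty, which Pre_ guarantees
    let prev := (PySem.List.pyGet? live 0).getD 0
    pvLoopB extra 1 prev (PySem.List.slice live (some 1) none)

-- ===== PRECONDITION & SPEC =====
-- Pre_ excludes n ≤ 0 (A raises ZeroDivisionError at n = 0; a negative computer count is
-- outside the task's natural domain) and, when there are at least n batteries, negative
-- capacities (outside the natural domain: capacities are nonnegative energies, and A's
-- binary search is meaningless there); with fewer than n batteries any capacities are admitted.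
def Pre_maxRunTime (n : Int) (batteries : List Int) : Prop :=
  1 ≤ n ∧ ((batteries.length : Int) < n ∨ ∀ b ∈ batteries, 0 ≤ b)
instance (n : Int) (batteries : List Int) : Decidable (Pre_maxRunTime n batteries) := by
  unfold Pre_maxRunTime; infer_instance

def pvWitness_maxRunTime : Int × List Int := (2, [3, 3, 3])

def Spec_maxRunTime (n : Int) (batteries : List Int) (out : Int) : Prop := out = maxRunTime_alt n batteries
instance (n : Int) (batteries : List Int) (out : Int) : Decidable (Spec_maxRunTime n batteries out) := by unfold Spec_maxRunTime; infer_instance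

-- ===== CLAIM (what is proved, stated in full; the proofs are below) =====
def Claim_equal_maxRunTime : Prop := ∀ (n : Int) (batteries : List Int), Dom_maxRunTime n batteries → Pre_maxRunTime n batteries → Spec_maxRunTime n batteries (maxRunTime n batteries)

-- ===== LEMMAS AND PROOFS =====

-- Smin bs T = Σ min(b, T): the total energy usable during T minutes
def pvSmin (bs : List Int) (T : Int) : Int := (bs.map (fun b => min b T)).sum

-- feasibility: n computers can all run for T minutes
def pvF (n : Int) (bs : List Int) (T : Int) : Prop := n * T ≤ pvSmin bs T

-- r is THE answer: feasible, and nothing larger is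
def pvMaxChar (n : Int) (bs : List Int) (r : Int) : Prop :=
  pvF n bs r ∧ ∀ T, r < T → ¬ pvF n bs T

lemma pvMaxChar_unique {n : Int} {bs : List Int} {r1 r2 : Int}
    (h1 : pvMaxChar n bs r1) (h2 : pvMaxChar n bs r2) : r1 = r2 := by
  rcases lt_trichotomy r1 r2 with h | h | h
  · exact absurd h2.1 (h1.2 r2 h)
  · exact h
  · exact absurd h1.1 (h2.2 r1 h)

lemma pvSmin_nil (T : Int) : pvSmin [] T = 0 := rfl

lemma pvSmin_cons (b : Int) (bs : List Int) (T : Int) :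
    pvSmin (b :: bs) T = min b T + pvSmin bs T := by
  simp [pvSmin]

lemma pvSmin_zero {bs : List Int} (hbs : ∀ b ∈ bs, 0 ≤ b) : pvSmin bs 0 = 0 := by
  induction bs with
  | nil => rfl
  | cons b t ih =>
    have hb := hbs b (by simp)
    rw [pvSmin_cons, ih (fun x hx => hbs x (by simp [hx]))]
    omega

lemma pvSmin_le_sum (bs : List Int) (T : Int) : pvSmin bs T ≤ bs.sum := by
  induction bs with
  | nil => simp [pvSmin_nil]
  | cons b t ih => rw [pvSmin_cons, List.sum_cons]; omega

lemma pvSmin_le_len_mul (bs : List Int) (T : Int) : pvSmin bs T ≤ (bs.length : Int) * T := by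
  induction bs with
  | nil => simp [pvSmin_nil]
  | cons b t ih =>
    rw [pvSmin_cons]
    have : ((b :: t).length : Int) * T = T + (t.length : Int) * T := by
      push_cast [List.length_cons]; ring
    rw [this]; omega

lemma pvSmin_pred (bs : List Int) (T : Int) :
    pvSmin bs (T - 1) = pvSmin bs T - (bs.countP (fun b => decide (T - 1 < b)) : Int) := by
  induction bs with
  | nil => simp [pvSmin_nil]
  | cons b t ih =>
    rw [pvSmin_cons, pvSmin_cons, List.countP_cons, ih]
    by_cases h : T - 1 < b
    · simp only [h, decide_true, if_true]
      push_cast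
      omega
    · simp only [h, decide_false]
      push_cast
      omega

lemma pvSmin_ge_count_mul {bs : List Int} (hbs : ∀ b ∈ bs, 0 ≤ b) {T : Int} (_hT : 0 ≤ T) :
    (bs.countP (fun b => decide (T < b)) : Int) * T ≤ pvSmin bs T := by
  induction bs with
  | nil => simp [pvSmin_nil]
  | cons b t ih =>
    have hb := hbs b (by simp)
    have iht := ih (fun x hx => hbs x (by simp [hx]))
    rw [pvSmin_cons, List.countP_cons]
    by_cases h : T < b
    · have hmin : min b T = T := by omega
      simp only [h, decide_true, if_true, hmin]
      push_cast
      nlinarith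
    · have hmin : 0 ≤ min b T := by omega
      simp only [h, decide_false]
      push_cast
      nlinarith

lemma pvF_step_down {n : Int} {bs : List Int} (hbs : ∀ b ∈ bs, 0 ≤ b) {T : Int}
    (hT : 1 ≤ T) (hF : pvF n bs T) : pvF n bs (T - 1) := by
  unfold pvF at *
  have hp := pvSmin_pred bs T
  have hg := pvSmin_ge_count_mul hbs (T := T - 1) (by omega)
  set c : Int := (bs.countP (fun b => decide (T - 1 < b)) : Int) with hc
  by_cases hcn : c ≤ n
  · nlinarith
  · nlinarith

lemma pvF_down {n : Int} {bs : List Int} (hbs : ∀ b ∈ bs, 0 ≤ b) {t T : Int}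
    (ht : 0 ≤ t) (htT : t ≤ T) (hF : pvF n bs T) : pvF n bs t := by
  have key : ∀ k : Nat, ∀ T, T = t + (k : Int) → pvF n bs T → pvF n bs t := by
    intro k
    induction k with
    | zero => intro T hT hF; simpa [hT] using hF
    | succ k ih =>
      intro T hT hF
      have h1 : pvF n bs (T - 1) := pvF_step_down hbs (by push_cast at hT ⊢; omega) hF
      exact ih (T - 1) (by push_cast at hT ⊢; omega) h1
  exact key (T - t).toNat T (by omega) hF

lemma pvCannotRun_iff (n : Int) (bs : List Int) (T : Int) :
    pvCannotRun n bs T = true ↔ ¬ pvF n bs T := by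
  have hfold : ∀ (l : List Int) (s : Int),
      l.foldl (fun s t => if t < T then s + t else s + T) s = s + pvSmin l T := by
    intro l
    induction l with
    | nil => intro s; simp [pvSmin_nil]
    | cons b t ih =>
      intro s
      rw [List.foldl_cons, ih, pvSmin_cons]
      split_ifs with h <;> omega
  unfold pvCannotRun pvF
  rw [hfold]
  simp only [decide_eq_true_eq, zero_add]
  omega

-- the binary-search loop of A lands on the characterized answer
lemma pvLoopA_char {n : Int} {bs : List Int} (hbs : ∀ b ∈ bs, 0 ≤ b) :
    ∀ (m : Nat) (low high : Int), (high - low).toNat ≤ m → 0 ≤ low → low ≤ high →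
      pvF n bs low → (∀ T, high < T → ¬ pvF n bs T) →
      pvMaxChar n bs (pvLoopA n bs low high) := by
  intro m
  induction m with
  | zero =>
    intro low high hm h0 hle hF hH
    have hlh : low = high := by omega
    have hres : pvLoopA n bs low high = low := by rw [pvLoopA]; simp [hlh]
    rw [hres]
    exact ⟨hF, fun T hT => hH T (by omega)⟩
  | succ m ih =>
    intro low high hm h0 hle hF hH
    rw [pvLoopA]
    by_cases h : low < high
    · simp only [h, dite_true]
      rw [PySem.Int.floordiv_eq_ediv_of_pos (by omega : (0:Int) < 2)]
      set guess := high - (high - low) / 2 with hg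
      have hgb : low < guess ∧ guess ≤ high := by constructor <;> omega
      by_cases hc : pvCannotRun n bs guess = true
      · simp only [hc, if_true]
        have hnF : ¬ pvF n bs guess := (pvCannotRun_iff n bs guess).mp hc
        exact ih low (guess - 1) (by omega) h0 (by
          -- low ≤ guess - 1
          omega) hF (by
          intro T hT hFT
          exact hnF (pvF_down hbs (by omega) (by omega) hFT))
      · simp only [hc]
        have hFg : pvF n bs guess := by
          by_contra hcon
          exact hc ((pvCannotRun_iff n bs guess).mpr hcon)
        exact ih guess high (by omega) (by omega) (by omega) hFg hH
    · simp only [h, dite_false]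
      have hlh : low = high := by omega
      exact ⟨hF, fun T hT => hH T (by omega)⟩

lemma pvSmin_eq_sum_of_le {bs : List Int} {T : Int} (h : ∀ b ∈ bs, b ≤ T) :
    pvSmin bs T = bs.sum := by
  induction bs with
  | nil => rfl
  | cons b t ih =>
    have hb := h b (by simp)
    rw [pvSmin_cons, List.sum_cons, ih (fun x hx => h x (by simp [hx]))]
    omega

lemma pvSmin_eq_len_mul_of_ge {bs : List Int} {T : Int} (h : ∀ b ∈ bs, T ≤ b) :
    pvSmin bs T = (bs.length : Int) * T := by
  induction bs with
  | nil => simp [pvSmin_nil]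
  | cons b t ih =>
    have hb := h b (by simp)
    rw [pvSmin_cons, ih (fun x hx => h x (by simp [hx]))]
    have : ((b :: t).length : Int) * T = T + (t.length : Int) * T := by
      push_cast [List.length_cons]; ring
    rw [this]; omega

-- the greedy loop of B lands on the characterized answer
lemma pvLoopB_char {n : Int} {bs : List Int} (hbs : ∀ b ∈ bs, 0 ≤ b) :
    ∀ (rem : List Int) (extra count prev : Int),
      0 < count → count + (rem.length : Int) = n → 0 ≤ extra → 0 ≤ prev →
      rem.Pairwise (· ≤ ·) → (∀ b ∈ rem, prev ≤ b) →
      (∀ T, prev ≤ T → pvSmin bs T = extra + count * prev + pvSmin rem T) →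
      pvMaxChar n bs (pvLoopB extra count prev rem) := by
  intro rem
  induction rem with
  | nil =>
    intro extra count prev hc hn he hp _ _ hsum
    rw [pvLoopB, PySem.Int.floordiv_eq_ediv_of_pos hc]
    set q := extra / count with hq
    have hrm : extra = count * q + extra % count := (Int.ediv_add_emod extra count).symm
    have hr0 : 0 ≤ extra % count := Int.emod_nonneg extra (by omega)
    have hr1 : extra % count < count := Int.emod_lt_of_pos extra hc
    have hq0 : 0 ≤ q := Int.ediv_nonneg he (by omega)
    have hn' : n = count := by simp at hn; omega
    constructor
    · unfold pvF
      rw [hsum (prev + q) (by omega), pvSmin_nil, hn']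
      nlinarith
    · intro T hT hFT
      have hF1 : pvF n bs (prev + q + 1) := pvF_down hbs (by omega) (by omega) hFT
      unfold pvF at hF1
      rw [hsum (prev + q + 1) (by omega), pvSmin_nil, hn'] at hF1
      nlinarith
  | cons nxt rest ih =>
    intro extra count prev hc hn he hp hsort hge hsum
    rw [pvLoopB]
    have hpn : prev ≤ nxt := hge nxt (by simp)
    have hrest_sort : rest.Pairwise (· ≤ ·) := (List.pairwise_cons.mp hsort).2
    have hnxt_le : ∀ b ∈ rest, nxt ≤ b := (List.pairwise_cons.mp hsort).1
    by_cases hstop : extra < count * (nxt - prev)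
    · simp only [hstop, if_true]
      rw [PySem.Int.floordiv_eq_ediv_of_pos hc]
      set q := extra / count with hq
      have hrm : extra = count * q + extra % count := (Int.ediv_add_emod extra count).symm
      have hr0 : 0 ≤ extra % count := Int.emod_nonneg extra (by omega)
      have hr1 : extra % count < count := Int.emod_lt_of_pos extra hc
      have hq0 : 0 ≤ q := Int.ediv_nonneg he (by omega)
      -- prev + q < nxt
      have hlt : prev + q < nxt := by nlinarith
      have hL : ((nxt :: rest).length : Int) = n - count := by omega
      have hseg : ∀ T, prev ≤ T → T ≤ nxt →
          pvSmin bs T = extra + count * prev + (n - count) * T := by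
        intro T h1 h2
        rw [hsum T h1, pvSmin_eq_len_mul_of_ge (bs := nxt :: rest) (T := T) ?_, hL]
        intro b hb
        rcases List.mem_cons.mp hb with h | h
        · omega
        · have := hnxt_le b h; omega
      constructor
      · unfold pvF
        rw [hseg (prev + q) (by omega) (by omega)]
        nlinarith
      · intro T hT hFT
        have hF1 : pvF n bs (prev + q + 1) := pvF_down hbs (by omega) (by omega) hFT
        unfold pvF at hF1
        rw [hseg (prev + q + 1) (by omega) (by omega)] at hF1
        nlinarith
    · simp only [hstop]
      apply ih (extra - count * (nxt - prev)) (count + 1) nxt (by omega) (by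
          simp at hn ⊢; omega) (by omega) (by omega) hrest_sort hnxt_le
      intro T hT
      rw [hsum T (by omega), pvSmin_cons]
      have : min nxt T = nxt := by omega
      rw [this]; ring

-- with fewer than n batteries, A's loop keeps low = 0 and returns 0 (any capacities)
lemma pvLoopA_zero {n : Int} {bs : List Int} (hnF : ∀ T, 1 ≤ T → ¬ pvF n bs T) :
    ∀ (m : Nat) (high : Int), (high - 0).toNat ≤ m → pvLoopA n bs 0 high = 0 := by
  intro m
  induction m with
  | zero =>
    intro high hm
    rw [pvLoopA]
    rw [dif_neg (by omega : ¬ (0:Int) < high)]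
  | succ m ih =>
    intro high hm
    rw [pvLoopA]
    by_cases h : (0:Int) < high
    · rw [dif_pos h]
      rw [PySem.Int.floordiv_eq_ediv_of_pos (by omega : (0:Int) < 2)]
      set guess := high - (high - 0) / 2 with hg
      have hg1 : 1 ≤ guess ∧ guess ≤ high := by constructor <;> omega
      have hc : pvCannotRun n bs guess = true :=
        (pvCannotRun_iff n bs guess).mpr (hnF guess hg1.1)
      rw [if_pos hc]
      exact ih (guess - 1) (by omega)
    · rw [dif_neg h]

lemma pvNotF_of_short {n : Int} {bs : List Int} (hlen : (bs.length : Int) < n) :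
    ∀ T, 1 ≤ T → ¬ pvF n bs T := by
  intro T hT hF
  unfold pvF at hF
  have h1 := pvSmin_le_len_mul bs T
  nlinarith

lemma maxRunTime_alt_char {n : Int} {bs : List Int} (hn : 1 ≤ n) (hbs : ∀ b ∈ bs, 0 ≤ b) :
    pvMaxChar n bs (maxRunTime_alt n bs) := by
  unfold maxRunTime_alt
  by_cases hlen : (bs.length : Int) < n
  · simp only [hlen, if_true]
    constructor
    · unfold pvF
      rw [pvSmin_zero hbs]; omega
    · intro T hT hFT
      have hF1 : pvF n bs 1 := pvF_down hbs (by omega) (by omega) hFT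
      unfold pvF at hF1
      have := pvSmin_le_len_mul bs 1
      omega
  · simp only [hlen]
    set srt := PySem.List.sorted bs (fun x => x) false with hsrt
    have hperm : srt.Perm bs := PySem.List.sorted_perm bs (fun x => x) false
    have hlensrt : srt.length = bs.length := hperm.length_eq
    have hpw : srt.Pairwise (fun a b => a ≤ b) := by
      have := PySem.List.sorted_pairwise (xs := bs) (key := fun x => x)
      simpa using this
    set k := (bs.length : Int) - n with hk
    have hk0 : 0 ≤ k := by omega
    rw [PySem.List.slice_to srt hk0, PySem.List.slice_from srt hk0]
    set live := srt.drop k.toNat with hlive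
    have hlivelen : (live.length : Int) = n := by
      simp [hlive, hlensrt]; omega
    obtain ⟨l0, lt, hcons⟩ : ∃ l0 lt, live = l0 :: lt := by
      cases hlv : live with
      | nil => rw [hlv] at hlivelen; simp at hlivelen; omega
      | cons a b => exact ⟨a, b, rfl⟩
    rw [hcons]
    have hget : (PySem.List.pyGet? (l0 :: lt) 0).getD 0 = l0 := by
      simp [PySem.List.pyGet?, PySem.List.pyIdx?]
    rw [hget, PySem.List.slice_from_one (l0 :: lt)]
    simp only [List.tail_cons]
    -- facts about sortedness split: srt = take ++ l0 :: lt
    have hsplit : srt = srt.take k.toNat ++ (l0 :: lt) := by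
      rw [← hcons, hlive, List.take_append_drop]
    have hmem_srt : ∀ b ∈ srt, 0 ≤ b := by
      intro b hb; exact hbs b (hperm.mem_iff.mp hb)
    have hlive_pw : (l0 :: lt).Pairwise (fun a b => a ≤ b) := by
      rw [← hcons, hlive]
      exact hpw.sublist (List.drop_sublist _ _)
    have htake_le : ∀ x ∈ srt.take k.toNat, x ≤ l0 := by
      intro x hx
      have := hsplit ▸ hpw
      rw [List.pairwise_append] at this
      exact this.2.2 x hx l0 (by simp)
    have hl0 : 0 ≤ l0 := hmem_srt l0 (by rw [hsplit]; simp)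
    apply pvLoopB_char hbs lt ((srt.take k.toNat).sum) 1 l0 (by omega)
      (by
        have hltlen : (lt.length : Int) = n - 1 := by
          rw [hcons] at hlivelen; simp at hlivelen; omega
        omega)
      (by
        apply List.sum_nonneg
        intro x hx
        exact hmem_srt x (List.mem_of_mem_take hx))
      hl0
      (List.pairwise_cons.mp hlive_pw).2
      (List.pairwise_cons.mp hlive_pw).1
    intro T hT
    have hperm' : bs.Perm srt := hperm.symm
    have hsmin_perm : pvSmin bs T = pvSmin srt T := by
      unfold pvSmin
      exact ((hperm'.map (fun b => min b T)).sum_eq)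
    rw [hsmin_perm]
    conv_lhs => rw [hsplit]
    unfold pvSmin
    rw [List.map_append, List.sum_append]
    have h1 : ((srt.take k.toNat).map (fun b => min b T)).sum = (srt.take k.toNat).sum :=
      pvSmin_eq_sum_of_le (fun b hb => le_trans (htake_le b hb) hT)
    have h2 : ((l0 :: lt).map (fun b => min b T)).sum = min l0 T + (lt.map (fun b => min b T)).sum := by
      simp
    rw [h1, h2]
    have : min l0 T = l0 := by omega
    rw [this]
    ring

lemma maxRunTime_char {n : Int} {bs : List Int} (hn : 1 ≤ n) (hbs : ∀ b ∈ bs, 0 ≤ b) :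
    pvMaxChar n bs (maxRunTime n bs) := by
  unfold maxRunTime
  rw [PySem.Int.floordiv_eq_ediv_of_pos (by omega : (0:Int) < n)]
  have hsum0 : 0 ≤ bs.sum := List.sum_nonneg hbs
  apply pvLoopA_char hbs (bs.sum / n - 0).toNat _ _ le_rfl le_rfl
    (Int.ediv_nonneg hsum0 (by omega))
  · unfold pvF
    rw [pvSmin_zero hbs]; omega
  · intro T hT hFT
    unfold pvF at hFT
    have h1 : pvSmin bs T ≤ bs.sum := pvSmin_le_sum bs T
    have h2 : T ≤ bs.sum / n := (Int.le_ediv_iff_mul_le (by omega)).mpr (by nlinarith)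
    omega

-- ===== VERDICT (by name: the statement is the Claim_ definition above) =====
theorem maxRunTime_spec : Claim_equal_maxRunTime := by
  intro n bs _ hpre
  unfold Spec_maxRunTime
  obtain ⟨hn, hdisj⟩ := hpre
  by_cases hlen : (bs.length : Int) < n
  · have hA : maxRunTime n bs = 0 := by
      unfold maxRunTime
      exact pvLoopA_zero (pvNotF_of_short hlen) (PySem.Int.floordiv bs.sum n - 0).toNat _ le_rfl
    have hB : maxRunTime_alt n bs = 0 := by
      unfold maxRunTime_alt
      rw [if_pos hlen]
    rw [hA, hB]
  · have hbs : ∀ b ∈ bs, 0 ≤ b := by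
      rcases hdisj with h | h
      · exact absurd h hlen
      · exact h
    exact pvMaxChar_unique (maxRunTime_char hn hbs) (maxRunTime_alt_char hn hbs)
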